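-- pv_equiv track=rewrite | github.com/PedroBarbosa/dress | dress/utils/calculate_combinatorial_complexity.py | generate_mnps
-- ===== SOURCE A (Python) =====
-- import itertools
--
-- def generate_mnps(sequence: str, max_size: int):
--     nucleotides = ["A", "T", "C", "G"]
--     mnps = []
--
--     for size in range(2, max_size + 1):
--
--         for pos in range(len(sequence) - size + 1):
--             start_pos = pos
--             end_pos = pos + size
--             seq = sequence[start_pos:end_pos]
--
--             for changes in itertools.product(nucleotides, repeat=size):
--                 if any([c == seq[i] for i, c in enumerate(changes)]):
--                     continue
--
--                 mnp = "".join(changes)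
--                 mnps.append(mnp)
--
--     return mnps
-- ===== SOURCE B (Python) =====
-- def generate_mnps(sequence: str, max_size: int):
--     nucleotides = "ATCG"
--
--     def mismatches(window):
--         # all strings of len(window) differing from window at every position,
--         # in the same order as itertools.product over per-position alternatives
--         if not window:
--             return [""]
--         rest = mismatches(window[1:])
--         return [n + tail for n in nucleotides if n != window[0] for tail in rest]
--
--     return [m
--             for size in range(2, max_size + 1)
--             for pos in range(len(sequence) - size + 1)
--             for m in mismatches(sequence[pos:pos + size])]
-- ===== Notes on version B (the rewrite author's own statement) =====
-- stated objective: alternative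
-- what changed: Instead of enumerating all 4^size nucleotide tuples per window and filtering out those matching the window at some position, B uses a recursive per-window generator that prepends only the three allowed nucleotides per position to the mismatch strings of the tail, and flattens the whole result with comprehensions instead of A's accumulator loops; it builds 3^size candidates instead of filtering 4^size, but the exponential output size dominates, so a timing run shows no stable speed-up.
import Mathlib
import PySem

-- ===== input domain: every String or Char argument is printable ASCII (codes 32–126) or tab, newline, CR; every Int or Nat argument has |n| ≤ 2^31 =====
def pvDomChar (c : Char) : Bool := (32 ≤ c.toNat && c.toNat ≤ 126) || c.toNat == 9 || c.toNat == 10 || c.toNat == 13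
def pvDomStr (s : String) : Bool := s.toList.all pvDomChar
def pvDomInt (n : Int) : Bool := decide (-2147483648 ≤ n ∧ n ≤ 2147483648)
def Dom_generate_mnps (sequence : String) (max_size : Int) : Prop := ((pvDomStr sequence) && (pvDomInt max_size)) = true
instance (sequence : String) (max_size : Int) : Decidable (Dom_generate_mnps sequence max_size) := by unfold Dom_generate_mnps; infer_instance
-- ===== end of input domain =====

-- B replaces A's generate-all-4^size-tuples-then-filter inner loop by a recursive
-- per-window generator that only builds strings already differing at every position,
-- flattened by comprehensions instead of A's accumulator loops (alternative algorithm).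

-- ===== PORT A =====
-- nucleotides = ["A", "T", "C", "G"]
def pvNucs : List Char := ['A', 'T', 'C', 'G']

-- itertools.product(nucleotides, repeat=n) (tuples as lists of chars, in product order)
def pvProdRep : Nat → List (List Char)
  | 0 => [[]]
  | n + 1 => pvNucs.flatMap (fun c => (pvProdRep n).map (c :: ·))

def generate_mnps (sequence : String) (max_size : Int) : List String :=
  (PySem.List.pyRange 2 (max_size + 1) 1).foldl (fun mnps size =>
    (PySem.List.pyRange 0 (PySem.Str.len sequence - size + 1) 1).foldl (fun mnps pos =>
      let seq := PySem.List.slice sequence.toList (some pos) (some (pos + size))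
      (pvProdRep size.toNat).foldl (fun mnps changes =>
        -- if any([c == seq[i] for i, c in enumerate(changes)]): continue
        if (PySem.List.enumerate changes 0).any
            (fun ic => PySem.List.pyGet? seq ic.1 == some ic.2) then mnps
        else mnps ++ [String.ofList changes]) mnps) mnps) []

-- ===== PORT B =====
-- def mismatches(window): recursion on the window's characters, prepending each
-- allowed nucleotide to every mismatch string of the tail
def pvMismatches : List Char → List String
  | [] => [""]
  | ch :: rest =>
      (pvNucs.filter (fun n => !(n == ch))).flatMap
        (fun n => (pvMismatches rest).map (fun tail => String.ofList (n :: tail.toList)))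

-- the nested list comprehension
def generate_mnps_alt (sequence : String) (max_size : Int) : List String :=
  (PySem.List.pyRange 2 (max_size + 1) 1).flatMap (fun size =>
    (PySem.List.pyRange 0 (PySem.Str.len sequence - size + 1) 1).flatMap (fun pos =>
      pvMismatches (PySem.List.slice sequence.toList (some pos) (some (pos + size)))))

-- ===== PRECONDITION & SPEC =====
def Spec_generate_mnps (sequence : String) (max_size : Int) (out : List String) : Prop := out = generate_mnps_alt sequence max_size
instance (sequence : String) (max_size : Int) (out : List String) : Decidable (Spec_generate_mnps sequence max_size out) := by unfold Spec_generate_mnps; infer_instance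

-- ===== CLAIM (what is proved, stated in full; the proofs are below) =====
def Claim_equal_generate_mnps : Prop := ∀ (sequence : String) (max_size : Int), Dom_generate_mnps sequence max_size → Spec_generate_mnps sequence max_size (generate_mnps sequence max_size)

-- ===== LEMMAS AND PROOFS =====

theorem pv_foldl_skip_if {α β : Type} (l : List α) (p : α → Bool) (f : α → β) (acc : List β) :
    l.foldl (fun a x => if p x then a else a ++ [f x]) acc
      = acc ++ (l.filter (fun x => !p x)).map f := by
  induction l generalizing acc with
  | nil => simp
  | cons x xs ih =>
    simp only [List.foldl_cons, List.filter_cons]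
    by_cases h : p x
    · simp [h, ih]
    · simp [h, ih]

theorem pv_flatMap_ite_nil {α β : Type} (l : List α) (q : α → Bool) (f : α → List β) :
    (l.flatMap (fun c => if q c then f c else []))
      = (l.filter q).flatMap f := by
  induction l with
  | nil => simp
  | cons x xs ih =>
    simp only [List.flatMap_cons, List.filter_cons]
    by_cases h : q x <;> simp [h, ih]

theorem pv_enumerate_shift (ch : Char) (w : List Char) (t : List Char) (s : Nat) :
    (PySem.List.enumerate t ((s : Int) + 1)).any
        (fun ic => PySem.List.pyGet? (ch :: w) ic.1 == some ic.2)
      = (PySem.List.enumerate t (s : Int)).any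
        (fun ic => PySem.List.pyGet? w ic.1 == some ic.2) := by
  induction t generalizing s with
  | nil => simp [PySem.List.enumerate_nil]
  | cons x xs ih =>
    rw [PySem.List.enumerate_cons, PySem.List.enumerate_cons]
    simp only [List.any_cons]
    rw [PySem.List.pyGet?_cons_succ]
    have : ((s : Int) + 1 + 1) = (((s + 1 : Nat) : Int) + 1) := by push_cast; ring
    rw [this, ih (s + 1)]
    norm_cast

-- the key lemma: A's filtered full product, joined, = B's recursive mismatch strings
theorem pv_key (w : List Char) :
    ((pvProdRep w.length).filter
        (fun t => !((PySem.List.enumerate t 0).any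
          (fun ic => PySem.List.pyGet? w ic.1 == some ic.2)))).map String.ofList
      = pvMismatches w := by
  induction w with
  | nil => simp [pvProdRep, pvMismatches, PySem.List.enumerate_nil]
  | cons ch w ih =>
    simp only [List.length_cons]
    rw [pvProdRep, pvMismatches]
    rw [List.filter_flatMap, List.map_flatMap]
    rw [← pv_flatMap_ite_nil pvNucs (fun n => !(n == ch))
      (fun n => (pvMismatches w).map (fun tail => String.ofList (n :: tail.toList)))]
    apply List.flatMap_congr
    intro c _
    rw [List.filter_map, List.map_map]
    by_cases h : c = ch
    · subst h
      simp only [beq_self_eq_true, Bool.not_true]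
      have : ∀ t : List Char,
          ((fun t => !((PySem.List.enumerate t 0).any
            (fun ic => PySem.List.pyGet? (c :: w) ic.1 == some ic.2))) ∘ (c :: ·)) t = false := by
        intro t
        simp only [Function.comp_apply]
        rw [PySem.List.enumerate_cons]
        simp only [List.any_cons, PySem.List.pyGet?_zero_cons]
        simp
      rw [List.filter_congr (fun t _ => this t)]
      simp
    · have hne : (c == ch) = false := by simp [h]
      simp only [hne, Bool.not_false, if_true]
      rw [← ih, List.map_map]
      have hfilter : (List.filter ((fun t => !((PySem.List.enumerate t 0).any
            (fun ic => PySem.List.pyGet? (ch :: w) ic.1 == some ic.2))) ∘ (c :: ·))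
            (pvProdRep w.length))
          = (pvProdRep w.length).filter
            (fun t => !((PySem.List.enumerate t 0).any
              (fun ic => PySem.List.pyGet? w ic.1 == some ic.2))) := by
        apply List.filter_congr
        intro t _
        simp only [Function.comp_apply]
        rw [PySem.List.enumerate_cons]
        simp only [List.any_cons, PySem.List.pyGet?_zero_cons]
        have hsh := pv_enumerate_shift ch w t 0
        norm_num at hsh
        rw [show ((0:Int) + 1) = (1:Int) by norm_num, hsh]
        have : (some ch == some c) = false := by simp [Ne.symm h]
        simp [this]
      rw [hfilter]
      apply List.map_congr_left
      intro t _
      simp [Function.comp]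

theorem pv_window (l : List Char) (size pos : Int)
    (hs : 0 ≤ size) (hp : 0 ≤ pos) (hle : pos + size ≤ (l.length : Int)) :
    (PySem.List.slice l (some pos) (some (pos + size))).length = size.toNat := by
  rw [PySem.List.slice_toNat l hp (by omega)]
  simp only [List.length_take, List.length_drop]
  omega

theorem generate_mnps_eq (sequence : String) (max_size : Int) :
    generate_mnps sequence max_size = generate_mnps_alt sequence max_size := by
  unfold generate_mnps generate_mnps_alt
  rw [show (PySem.List.pyRange 2 (max_size + 1) 1).flatMap (fun size =>
      (PySem.List.pyRange 0 (PySem.Str.len sequence - size + 1) 1).flatMap (fun pos =>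
        pvMismatches (PySem.List.slice sequence.toList (some pos) (some (pos + size)))))
      = [] ++ (PySem.List.pyRange 2 (max_size + 1) 1).flatMap (fun size =>
      (PySem.List.pyRange 0 (PySem.Str.len sequence - size + 1) 1).flatMap (fun pos =>
        pvMismatches (PySem.List.slice sequence.toList (some pos) (some (pos + size)))))
    from by simp]
  rw [← PySem.List.foldl_append_eq_flatMap]
  apply PySem.List.foldl_congr_mem
  intro mnps size hsize
  rw [PySem.List.mem_pyRange_one] at hsize
  rw [← PySem.List.foldl_append_eq_flatMap]
  apply PySem.List.foldl_congr_mem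
  intro mnps pos hpos
  rw [PySem.List.mem_pyRange_one] at hpos
  simp only []
  set w := PySem.List.slice sequence.toList (some pos) (some (pos + size)) with hw
  have hlen : w.length = size.toNat := by
    rw [hw]
    apply pv_window _ _ _ (by omega) (by omega)
    have := hpos.2
    simp only [PySem.Str.len_eq] at this ⊢
    omega
  rw [pv_foldl_skip_if, ← hlen, pv_key]

-- ===== VERDICT (by name: the statement is the Claim_ definition above) =====
theorem generate_mnps_spec : Claim_equal_generate_mnps := by
  intro sequence max_size _
  unfold Spec_generate_mnps
  exact generate_mnps_eq sequence max_size
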